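-- pv_equiv track=rewrite | github.com/Deferare/Problem-Solving | Programmers/프린터.py | solution
-- ===== SOURCE A (Python) =====
-- def solution(priorities, location):
--     maxs = []
--     for i in range(len(priorities)):
--         maxs.append(priorities[i])
--         priorities[i] = [i, priorities[i]]
--     maxs.sort()
--     result_cnt = 0
--     while len(priorities) > 0:
--         pop = priorities.pop(0)
--         if pop[1] == maxs[-1]:
--             result_cnt += 1
--             if pop[0] == location:
--                 break
--             maxs.pop()
--         else:
--             priorities.append(pop)
--     return result_cnt
-- ===== SOURCE B (Python) =====
-- def solution(priorities, location):
--     queue = list(enumerate(priorities))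
--     count = 0
--     while queue:
--         m = max(p for _, p in queue)
--         k = next(j for j, (_, p) in enumerate(queue) if p == m)
--         i, _ = queue[k]
--         count += 1
--         if i == location:
--             break
--         queue = queue[k + 1:] + queue[:k]
--     return count
-- ===== Notes on version B (the rewrite author's own statement) =====
-- stated objective: faster
-- what changed: Instead of pre-sorting all priorities and rotating the queue one element at a time with pop(0)/append against the sorted list's tail, B finds per printed document the position of the first current-maximum element and rotates past it with a single slice.
import Mathlib
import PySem

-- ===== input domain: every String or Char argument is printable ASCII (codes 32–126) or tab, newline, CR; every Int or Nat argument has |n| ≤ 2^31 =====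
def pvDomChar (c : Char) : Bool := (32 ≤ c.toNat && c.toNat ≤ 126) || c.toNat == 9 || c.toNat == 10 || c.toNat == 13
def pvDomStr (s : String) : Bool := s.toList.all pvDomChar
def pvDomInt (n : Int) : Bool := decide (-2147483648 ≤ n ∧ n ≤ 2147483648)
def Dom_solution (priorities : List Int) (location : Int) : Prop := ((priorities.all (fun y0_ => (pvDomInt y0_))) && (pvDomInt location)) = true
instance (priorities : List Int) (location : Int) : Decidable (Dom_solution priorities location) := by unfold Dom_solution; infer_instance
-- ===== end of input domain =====

-- B replaces A's one-element-at-a-time queue rotation against a pre-sorted priority list by, per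
-- printed document, jumping straight to the first current-maximum element and rotating with one
-- slice (objective: faster). NOTE: Python A destructively mutates its `priorities` argument
-- (overwrites the elements, then pops the list empty); the equivalence proved here is about the
-- return value only — B does not mutate.

-- ===== PORT A =====
-- the while-loop of A; `fuel` only makes the recursion structural (proved sufficient below, rotation
-- counts are bounded), every step is Python's.  maxs[-1] is pyGet? maxs (-1); the .getD 0 default is
-- never reached on A's actual states (maxs and the queue always have equal length, both nonempty).
def loopA : List (Int × Int) → List Int → Int → Int → Nat → Int
  | _, _, _, cnt, 0 => cnt
  | [], _, _, cnt, _ + 1 => cnt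
  | pop :: rest, maxs, loc, cnt, f + 1 =>
    if pop.2 = (PySem.List.pyGet? maxs (-1)).getD 0 then
      if pop.1 = loc then cnt + 1
      else loopA rest maxs.dropLast loc (cnt + 1) f
    else loopA (rest ++ [pop]) maxs loc cnt f

def solution (priorities : List Int) (location : Int) : Int :=
  -- the building for-loop: maxs collects the values, priorities[i] becomes the pair [i, priorities[i]]
  let st := (PySem.List.pyRange 0 priorities.length 1).foldl
      (fun (st : List Int × List (Int × Int)) i =>
        (st.1 ++ [PySem.List.pyGetD priorities i 0], st.2 ++ [(i, PySem.List.pyGetD priorities i 0)]))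
      ([], [])
  let maxs := PySem.List.sorted st.1 (fun x => x) false
  loopA st.2 maxs location 0 ((priorities.length + 1) * (priorities.length + 1))

-- ===== PORT B =====
-- Source B's while-loop: find the first element carrying the current maximum, print it, and rotate the
-- queue past it with one slice.  max(...) over a nonempty queue is PySem.List.max?; .getD 0 is dead
-- (the queue is nonempty in that branch).  `fuel` only makes the recursion structural: every round
-- prints exactly one document, so `queue.length` fuel is exact (proved in the lemmas below).
def loopB : List (Int × Int) → Int → Int → Nat → Int
  | _, _, cnt, 0 => cnt
  | [], _, cnt, _ + 1 => cnt
  | q0 :: qrest, loc, cnt, f + 1 =>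
    let queue := q0 :: qrest
    let m := (PySem.List.max? (queue.map Prod.snd) (fun y => y)).getD 0
    let k := queue.findIdx (fun x => x.2 == m)
    if (queue.getD k (0, 0)).1 = loc then cnt + 1
    else loopB (queue.drop (k + 1) ++ queue.take k) loc (cnt + 1) f

def solution_alt (priorities : List Int) (location : Int) : Int :=
  loopB (PySem.List.enumerate priorities 0) location 0 priorities.length

-- ===== PRECONDITION & SPEC =====
def Spec_solution (priorities : List Int) (location : Int) (out : Int) : Prop := out = solution_alt priorities location
instance (priorities : List Int) (location : Int) (out : Int) : Decidable (Spec_solution priorities location out) := by unfold Spec_solution; infer_instance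

-- ===== CLAIM (what is proved, stated in full; the proofs are below) =====
def Claim_equal_solution : Prop := ∀ (priorities : List Int) (location : Int), Dom_solution priorities location → Spec_solution priorities location (solution priorities location)

-- ===== LEMMAS AND PROOFS =====

-- the building fold produces (copy of the values, enumerate)
lemma build_fold_spec (f : Int → Int) (xs : List Int) (acc : List Int × List (Int × Int)) :
    xs.foldl (fun (st : List Int × List (Int × Int)) i =>
      (st.1 ++ [f i], st.2 ++ [(i, f i)])) acc
    = (acc.1 ++ xs.map f, acc.2 ++ xs.map (fun i => (i, f i))) := by
  induction xs generalizing acc with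
  | nil => simp
  | cons x xs ih => simp [ih]

lemma solution_eq_loopA (priorities : List Int) (location : Int) :
    solution priorities location
    = loopA (PySem.List.enumerate priorities 0)
        (PySem.List.sorted priorities (fun x => x) false) location 0
        ((priorities.length + 1) * (priorities.length + 1)) := by
  unfold solution
  rw [build_fold_spec (fun i => PySem.List.pyGetD priorities i 0)]
  simp only [List.nil_append]
  rw [PySem.List.map_pyGetD_pyRange_zero' priorities 0]
  congr 1
  rw [PySem.List.enumerate_eq_map_pyRange priorities 0]
  simp [PySem.List.len_eq]

-- last element of sorted = the (first) maximum, as values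
lemma sorted_last_spec (l : List Int) (h : l ≠ []) :
    ∃ M, (PySem.List.pyGet? (PySem.List.sorted l (fun x => x) false) (-1)).getD 0 = M
      ∧ M ∈ l ∧ ∀ y ∈ l, y ≤ M := by
  have hsne : PySem.List.sorted l (fun x => x) false ≠ [] := by
    intro hs
    have hlen := PySem.List.length_sorted l (fun x => x) false
    rw [hs] at hlen
    exact h (List.length_eq_zero_iff.mp hlen.symm)
  refine ⟨(PySem.List.sorted l (fun x => x) false).getLast hsne, ?_, ?_, ?_⟩
  · rw [PySem.List.pyGet?_neg_one, List.getLast?_eq_some_getLast (h := hsne)]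
    rfl
  · exact (PySem.List.sorted_perm l (fun x => x) false).mem_iff.mp (List.getLast_mem hsne)
  · intro y hy
    have hys : y ∈ PySem.List.sorted l (fun x => x) false :=
      (PySem.List.sorted_perm l (fun x => x) false).mem_iff.mpr hy
    have hp := PySem.List.sorted_pairwise l (fun x => x)
    have hdec := List.dropLast_append_getLast hsne
    rw [← hdec] at hp hys
    rcases List.mem_append.mp hys with hyd | hyl
    · exact (List.pairwise_append.mp hp).2.2 y hyd _ (by simp)
    · simp only [List.mem_singleton] at hyl
      exact le_of_eq hyl

lemma max_getD_eq (l : List Int) (h : l ≠ []) :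
    ((PySem.List.max? l (fun y => y)).getD 0) = (PySem.List.pyGet? (PySem.List.sorted l (fun x => x) false) (-1)).getD 0 := by
  obtain ⟨M, hM, hMmem, hMmax⟩ := sorted_last_spec l h
  cases hm : PySem.List.max? l (fun y => y) with
  | none => exact absurd ((PySem.List.max?_eq_none_iff l _).mp hm) h
  | some v =>
    have hv1 : v ∈ l := PySem.List.max?_mem hm
    have hv2 : ∀ y ∈ l, y ≤ v := PySem.List.max?_isMax hm
    rw [hM]
    simp only [Option.getD_some]
    exact le_antisymm (hMmax v hv1) (hv2 M hMmem)

-- removing one maximal value: sorted of the rest is dropLast of sorted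
lemma sorted_dropLast_spec (l rest : List Int) (M : Int) (hp : l.Perm (M :: rest))
    (hmax : ∀ y ∈ l, y ≤ M) :
    PySem.List.sorted rest (fun x => x) false
      = (PySem.List.sorted l (fun x => x) false).dropLast := by
  have hne : l ≠ [] := by
    intro h; rw [h] at hp; exact absurd hp.symm.length_eq (by simp)
  have hsne : PySem.List.sorted l (fun x => x) false ≠ [] := by
    intro hs
    have hlen := PySem.List.length_sorted l (fun x => x) false
    rw [hs] at hlen
    exact hne (List.length_eq_zero_iff.mp hlen.symm)
  -- the last element of sorted l equals M (both are the maximum value of l)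
  obtain ⟨M', hM', hM'mem, hM'max⟩ := sorted_last_spec l hne
  have hgl : (PySem.List.sorted l (fun x => x) false).getLast hsne = M' := by
    rw [PySem.List.pyGet?_neg_one, List.getLast?_eq_some_getLast (h := hsne)] at hM'
    simpa using hM'
  have hMM' : M' = M := by
    have hMl : M ∈ l := hp.mem_iff.mpr (by simp)
    exact le_antisymm (hmax M' hM'mem) (hM'max M hMl)
  -- Perm: dropLast ++ [M] = sorted l ~ l ~ M :: rest ~ rest ++ [M]
  have hdec := List.dropLast_append_getLast hsne
  rw [hgl, hMM'] at hdec
  have hperm : ((PySem.List.sorted l (fun x => x) false).dropLast ++ [M]).Perm (rest ++ [M]) := by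
    rw [hdec]
    exact ((PySem.List.sorted_perm l _ false).trans hp).trans
      (by simpa using (List.perm_append_comm (l₁ := [M]) (l₂ := rest)))
  have hperm' : (PySem.List.sorted l (fun x => x) false).dropLast.Perm rest :=
    (List.perm_append_right_iff [M]).mp hperm
  exact PySem.List.sorted_id_eq_of_perm_of_pairwise rest _ hperm'
    ((PySem.List.sorted_pairwise l (fun x => x)).sublist (List.dropLast_sublist _))

-- A's rotation phase: elements whose priority is not maxs[-1] go to the back, one fuel each
lemma loopA_rot (pre : List (Int × Int)) (Q : List (Int × Int)) (maxs : List Int)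
    (loc cnt : Int) (fuel : Nat)
    (hpre : ∀ x ∈ pre, ¬ (x.2 = (PySem.List.pyGet? maxs (-1)).getD 0)) :
    loopA (pre ++ Q) maxs loc cnt (pre.length + fuel) = loopA (Q ++ pre) maxs loc cnt fuel := by
  induction pre generalizing Q fuel with
  | nil => simp
  | cons a pre ih =>
    have ha : ¬ (a.2 = (PySem.List.pyGet? maxs (-1)).getD 0) := hpre a (by simp)
    have hpre' : ∀ x ∈ pre, ¬ (x.2 = (PySem.List.pyGet? maxs (-1)).getD 0) :=
      fun x hx => hpre x (by simp [hx])
    have h1 : loopA (a :: (pre ++ Q)) maxs loc cnt (pre.length + fuel + 1)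
        = loopA ((pre ++ Q) ++ [a]) maxs loc cnt (pre.length + fuel) := by
      simp [loopA, ha]
    calc loopA ((a :: pre) ++ Q) maxs loc cnt ((a :: pre).length + fuel)
        = loopA (a :: (pre ++ Q)) maxs loc cnt (pre.length + fuel + 1) := by
          simp [Nat.add_assoc, Nat.add_comm 1 fuel]
      _ = loopA (pre ++ (Q ++ [a])) maxs loc cnt (pre.length + fuel) := by
          rw [h1, List.append_assoc]
      _ = loopA ((Q ++ [a]) ++ pre) maxs loc cnt fuel := ih _ _ hpre'
      _ = loopA (Q ++ a :: pre) maxs loc cnt fuel := by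
          rw [List.append_assoc]; rfl

-- the main simulation lemma
lemma loopA_eq_loopB (n : Nat) : ∀ (Q : List (Int × Int)) (loc cnt : Int) (fuel : Nat),
    ∀ fuelB, Q.length = n → n * (n + 1) ≤ fuel → n ≤ fuelB →
    loopA Q (PySem.List.sorted (Q.map Prod.snd) (fun x => x) false) loc cnt fuel
      = loopB Q loc cnt fuelB := by
  induction n using Nat.strong_induction_on with
  | _ n ih =>
    intro Q loc cnt fuel fuelB hlen hfuel hfuelB
    match Q, hlen with
    | [], hlen =>
      cases fuel <;> cases fuelB <;> simp [loopA, loopB]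
    | q0 :: qrest, hlen =>
      have hQne : (q0 :: qrest) ≠ [] := by simp
      set Q := q0 :: qrest with hQdef
      have hlne : Q.map Prod.snd ≠ [] := by simp [hQdef]
      obtain ⟨M, hM, hMmem, hMmax⟩ := sorted_last_spec (Q.map Prod.snd) hlne
      have hmeq : ((PySem.List.max? (Q.map Prod.snd) (fun y => y)).getD 0) = M := by
        rw [max_getD_eq _ hlne, hM]
      -- the index of the first maximal element
      set k := Q.findIdx (fun x => x.2 == M) with hkdef
      have hk : k < Q.length := by
        rcases List.mem_map.mp hMmem with ⟨x, hx, hx2⟩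
        exact List.findIdx_lt_length_of_exists ⟨x, hx, by simp [hx2]⟩
      have hak : (Q[k]'hk).2 = M := by
        have := List.findIdx_getElem (w := hk)
        simpa using this
      have hpre : ∀ x ∈ Q.take k, ¬ (x.2 = (PySem.List.pyGet? (PySem.List.sorted (Q.map Prod.snd) (fun x => x) false) (-1)).getD 0) := by
        intro x hx
        rw [hM]
        rcases List.mem_take_iff_getElem.mp hx with ⟨j, hj, rfl⟩
        have hjk : j < k := lt_min_iff.mp hj |>.1
        have := List.not_of_lt_findIdx (p := fun x : Int × Int => x.2 == M) (xs := Q) hjk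
        simpa using this
      have hQsplit : Q = Q.take k ++ (Q[k]'hk) :: Q.drop (k + 1) := by
        conv_lhs => rw [← List.take_append_drop k Q]
        rw [List.getElem_cons_drop]
      have hn : 1 ≤ n := by omega
      obtain ⟨m, rfl⟩ : ∃ m, n = m + 1 := ⟨n - 1, by omega⟩
      have hkm : k ≤ m := by omega
      have hfl : k ≤ fuel := by nlinarith
      obtain ⟨f', rfl⟩ : ∃ f', fuel = k + f' := ⟨fuel - k, by omega⟩
      have hf' : m * (m + 1) + 1 ≤ f' := by nlinarith
      obtain ⟨f'', rfl⟩ : ∃ f'', f' = f'' + 1 := ⟨f' - 1, by omega⟩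
      have hfB : 1 ≤ fuelB := by omega
      obtain ⟨fB, rfl⟩ : ∃ fB, fuelB = fB + 1 := ⟨fuelB - 1, by omega⟩
      -- rotate the non-maximal prefix to the back (k fuel steps)
      have hrot := loopA_rot (Q.take k) ((Q[k]'hk) :: Q.drop (k + 1))
        (PySem.List.sorted (Q.map Prod.snd) (fun x => x) false) loc cnt (f'' + 1) hpre
      rw [List.length_take, Nat.min_eq_left (le_of_lt hk)] at hrot
      -- the remaining queue after printing Q[k]
      have hrlen : (Q.drop (k + 1) ++ Q.take k).length = m := by
        simp only [List.length_append, List.length_drop, List.length_take]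
        omega
      -- Q is a permutation of Q[k] :: (Q.drop (k + 1) ++ Q.take k)
      have hpermQ : Q.Perm ((Q[k]'hk) :: (Q.drop (k + 1) ++ Q.take k)) := by
        conv_lhs => rw [hQsplit]
        exact (List.perm_middle).trans ((List.perm_append_comm).cons _)
      have hsdrop : PySem.List.sorted ((Q.drop (k + 1) ++ Q.take k).map Prod.snd) (fun x => x) false
          = (PySem.List.sorted (Q.map Prod.snd) (fun x => x) false).dropLast := by
        apply sorted_dropLast_spec (Q.map Prod.snd) ((Q.drop (k + 1) ++ Q.take k).map Prod.snd) M
        · have := hpermQ.map Prod.snd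
          simpa [hak] using this
        · exact hMmax
      -- unfold one step of loopB
      have hB : loopB Q loc cnt (fB + 1)
          = if (Q[k]'hk).1 = loc then cnt + 1 else loopB (Q.drop (k + 1) ++ Q.take k) loc (cnt + 1) fB := by
        show (let m := (PySem.List.max? (Q.map Prod.snd) (fun y => y)).getD 0
              let k' := Q.findIdx (fun x => x.2 == m)
              if (Q.getD k' (0, 0)).1 = loc then cnt + 1
              else loopB (Q.drop (k' + 1) ++ Q.take k') loc (cnt + 1) fB) = _
        simp only [hmeq, ← hkdef, List.getD_eq_getElem _ _ hk]
      have hL := congrArg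
        (fun q => loopA q (PySem.List.sorted (Q.map Prod.snd) (fun x => x) false) loc cnt (k + (f'' + 1)))
        hQsplit
      simp only at hL
      rw [hB, hL, hrot]
      change (if (Q[k]'hk).2 = (PySem.List.pyGet? (PySem.List.sorted (Q.map Prod.snd) (fun x => x) false) (-1)).getD 0
          then if (Q[k]'hk).1 = loc then cnt + 1
               else loopA (Q.drop (k + 1) ++ Q.take k)
                 (PySem.List.sorted (Q.map Prod.snd) (fun x => x) false).dropLast loc (cnt + 1) f''
          else loopA ((Q.drop (k + 1) ++ Q.take k) ++ [Q[k]'hk])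
                 (PySem.List.sorted (Q.map Prod.snd) (fun x => x) false) loc cnt f'') = _
      rw [hM, hak, if_pos rfl]
      by_cases hloc : (Q[k]'hk).1 = loc
      · simp [hloc]
      · rw [if_neg hloc, if_neg hloc, ← hsdrop]
        exact ih m (by omega) (Q.drop (k + 1) ++ Q.take k) loc (cnt + 1) f'' fB hrlen (by nlinarith) (by omega)

-- ===== VERDICT (by name: the statement is the Claim_ definition above) =====
theorem solution_spec : Claim_equal_solution := by
  intro priorities location _
  unfold Spec_solution solution_alt
  rw [solution_eq_loopA]
  have hms : (PySem.List.enumerate priorities 0).map Prod.snd = priorities :=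
    PySem.List.map_snd_enumerate priorities 0
  have hlen : (PySem.List.enumerate priorities 0).length = priorities.length :=
    PySem.List.length_enumerate priorities 0
  have h := loopA_eq_loopB priorities.length (PySem.List.enumerate priorities 0) location 0
    ((priorities.length + 1) * (priorities.length + 1)) priorities.length
    hlen (by nlinarith) (le_refl _)
  rw [hms] at h
  exact h
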